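-- pv_equiv track=rewrite | github.com/hillshadow/time_series_recognition | temporal_shift.py | remove_front
-- ===== SOURCE A (Python) =====
-- def remove_front(x,y,level):
--     # Remove peack
--     cluster=[[x[i] for i in range(len(x)) if y[i]==j] for j in range(len(y))]
--     new_x=x
--     new_y=y
--     for c in cluster:
--         if len(c)>level:
--             new_x=[x[i] for i in range(len(x)) if x[i] not in c]
--             new_y=[y[i] for i in range(len(y)) if x[i] not in c]
--             x=new_x
--             y=new_y
--     return (new_x,new_y)
-- ===== SOURCE B (Python) =====
-- def remove_front(x, y, level):
--     # Count each label's cluster size once over the paired positions, collect the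
--     # x-values belonging to oversized clusters, and filter the pairs in one in-order pass.
--     counts = {}
--     for _, yi in zip(x, y):
--         counts[yi] = counts.get(yi, 0) + 1
--     bad = {xi for xi, yi in zip(x, y) if counts[yi] > level}
--     if not bad:
--         return (x, y)
--     new_x = []
--     new_y = []
--     for xi, yi in zip(x, y):
--         if xi not in bad:
--             new_x.append(xi)
--             new_y.append(yi)
--     return (new_x, new_y)
-- ===== Notes on version B (the rewrite author's own statement) =====
-- stated objective: faster
-- what changed: Replaces the cluster-list materialisation with repeated whole-list membership rescans by one label-count pass, one set of x-values in oversized clusters, and one in-order filtering pass over the (x,y) pairs.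
-- intended difference: On inputs where some paired label outside range(len(y)) has a cluster larger than level, A keeps those elements (its cluster loop only ranges over labels 0..len(y)-1, an accident of its indexing) while B removes them, which is the intended 'remove oversized clusters' behaviour. — e.g. on remove_front([1], ([5], 0)): A returns ([1], [5]), B returns ([], [])
import Mathlib
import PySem

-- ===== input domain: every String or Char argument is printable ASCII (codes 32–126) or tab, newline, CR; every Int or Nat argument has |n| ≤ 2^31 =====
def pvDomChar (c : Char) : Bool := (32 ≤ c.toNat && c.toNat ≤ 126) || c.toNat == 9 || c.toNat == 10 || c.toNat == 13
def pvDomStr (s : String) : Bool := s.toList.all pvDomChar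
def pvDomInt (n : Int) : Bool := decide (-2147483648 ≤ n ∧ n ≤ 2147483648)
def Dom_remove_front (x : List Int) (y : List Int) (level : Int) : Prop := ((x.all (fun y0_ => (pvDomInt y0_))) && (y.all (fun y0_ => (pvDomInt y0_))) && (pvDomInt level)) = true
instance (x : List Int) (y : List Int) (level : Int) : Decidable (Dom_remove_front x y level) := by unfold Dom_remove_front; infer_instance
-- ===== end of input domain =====

-- B replaces A's cubic cluster/membership rescans by one label-count pass, a bad-value set and
-- one in-order filtering pass (asymptotically faster); A = B outside D_ (oversized out-of-range labels).


-- ===== PORT A =====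
-- literal port of A: build cluster[j] for j in range(len(y)), then for each oversized
-- cluster filter (current) x and y by value-membership; indices x[i], y[i] are in range
-- wherever A evaluates them on Pre_, ported as getD.
def remove_front (x : List Int) (y : List Int) (level : Int) : List Int × List Int :=
  let cluster : List (List Int) :=
    (List.range y.length).map (fun (j : Nat) =>
      (List.range x.length).filterMap (fun i =>
        if y.getD i 0 = (j : Int) then some (x.getD i 0) else none))
  let st :=
    cluster.foldl
      (fun (st : (List Int × List Int) × (List Int × List Int)) c =>
        if level < (c.length : Int) then
          let nx := (List.range st.2.1.length).filterMap (fun i =>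
            if st.2.1.getD i 0 ∈ c then none else some (st.2.1.getD i 0))
          let ny := (List.range st.2.2.length).filterMap (fun i =>
            if st.2.1.getD i 0 ∈ c then none else some (st.2.2.getD i 0))
          ((nx, ny), (nx, ny))
        else st)
      ((x, y), (x, y))
  st.1

-- ===== PORT B =====
-- literal port of Source B: counts = {label: cluster size over the paired positions};
-- bad = set of x-values whose pair's label has an oversized cluster; if nothing is bad
-- return the inputs unchanged, else one filtering pass over the zipped pairs.
def remove_front_alt (x : List Int) (y : List Int) (level : Int) : List Int × List Int :=
  let counts : PySem.Dict Int Int :=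
    (x.zip y).foldl (fun d p => d.insert p.2 (d.getD p.2 0 + 1)) PySem.Dict.empty
  let bad : PySem.Set Int :=
    (x.zip y).foldl
      (fun s p => if level < counts.getD p.2 0 then PySem.Set.add s p.1 else s)
      PySem.Set.empty
  if bad = [] then (x, y)
  else
    (x.zip y).foldl
      (fun (acc : List Int × List Int) p =>
        if p.1 ∈ bad then acc else (acc.1 ++ [p.1], acc.2 ++ [p.2]))
      ([], [])

-- ===== PRECONDITION & SPEC =====
-- Pre_ is exactly where A returns: it excludes only the inputs where A raises IndexError
-- (x longer than a nonempty y; or x shorter than y and some label-cluster of the paired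
-- prefix exceeds level, which makes A index x beyond its length).
def Pre_remove_front (x : List Int) (y : List Int) (level : Int) : Prop :=
  (y.length = 0 ∨ x.length ≤ y.length) ∧
  (x.length < y.length →
    ∀ j ∈ List.range y.length, ((((x.zip y).map Prod.snd).count (j : Int) : Int) ≤ level))
instance (x : List Int) (y : List Int) (level : Int) : Decidable (Pre_remove_front x y level) := by
  unfold Pre_remove_front; infer_instance

def pvWitness_remove_front : List Int × List Int × Int := ([1, 2, 3], ([0, 0, 1], 1))

-- On inputs where some paired label outside range(len(y)) heads a cluster larger than level,
-- A keeps those elements (its cluster loop only ranges over labels 0..len(y)-1, an accident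
-- of its indexing) while B removes them, the intended 'remove oversized clusters' behaviour.
def D_remove_front (x : List Int) (y : List Int) (level : Int) : Prop :=
  ∃ p ∈ x.zip y, (p.2 < 0 ∨ (y.length : Int) ≤ p.2) ∧
    level < (((x.zip y).map Prod.snd).count p.2 : Int)
instance (x : List Int) (y : List Int) (level : Int) : Decidable (D_remove_front x y level) := by
  unfold D_remove_front; infer_instance

def Spec_remove_front (x : List Int) (y : List Int) (level : Int) (out : List Int × List Int) : Prop := ¬ D_remove_front x y level → out = remove_front_alt x y level
instance (x : List Int) (y : List Int) (level : Int) (out : List Int × List Int) : Decidable (Spec_remove_front x y level out) := by unfold Spec_remove_front; infer_instance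

def pvDiffWitness_remove_front : List Int × List Int × Int := ([1], ([5], 0))
def pvDiffWitnessOut_remove_front : (List Int × List Int) × (List Int × List Int) :=
  (([1], [5]), ([], []))

-- ===== CLAIM (what is proved, stated in full; the proofs are below) =====
def Claim_unchanged_remove_front : Prop := ∀ (x : List Int) (y : List Int) (level : Int), Dom_remove_front x y level → Pre_remove_front x y level → Spec_remove_front x y level (remove_front x y level)
def Claim_changed_remove_front : Prop := Dom_remove_front (pvDiffWitness_remove_front.1) (pvDiffWitness_remove_front.2.1) (pvDiffWitness_remove_front.2.2) ∧ Pre_remove_front (pvDiffWitness_remove_front.1) (pvDiffWitness_remove_front.2.1) (pvDiffWitness_remove_front.2.2) ∧ D_remove_front (pvDiffWitness_remove_front.1) (pvDiffWitness_remove_front.2.1) (pvDiffWitness_remove_front.2.2) ∧ remove_front (pvDiffWitness_remove_front.1) (pvDiffWitness_remove_front.2.1) (pvDiffWitness_remove_front.2.2) = pvDiffWitnessOut_remove_front.1 ∧ remove_front_alt (pvDiffWitness_remove_front.1) (pvDiffWitness_remove_front.2.1) (pvDiffWitness_remove_front.2.2) = pvDiffWitnessOut_remove_front.2 ∧ pvDiffWitnessOut_remove_front.1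 ≠ pvDiffWitnessOut_remove_front.2

-- ===== LEMMAS AND PROOFS =====

-- index-comprehension over a paired list = filterMap over the pairs
lemma range_filterMap_pair (l : List (Int × Int)) (f : Int → Int → Option Int) :
    (List.range l.length).filterMap
      (fun i => f ((l.map Prod.fst).getD i 0) ((l.map Prod.snd).getD i 0))
    = l.filterMap (fun p => f p.1 p.2) := by
  induction l with
  | nil => simp
  | cons p t ih =>
      simp only [List.length_cons, List.range_succ_eq_map, List.filterMap_cons,
        List.filterMap_map, List.map_cons, List.getD_cons_zero]
      have : ∀ i : Nat,
          ((Function.comp (fun i => f ((p.1 :: t.map Prod.fst).getD i 0)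
              ((p.2 :: t.map Prod.snd).getD i 0)) Nat.succ) i)
          = f ((t.map Prod.fst).getD i 0) ((t.map Prod.snd).getD i 0) := by
        intro i; simp [Function.comp]
      rw [List.filterMap_congr (fun i _ => this i), ih]

-- components of zip read through getD, below the zip's length
lemma getD_zip (x y : List Int) (i : Nat) (h : i < (x.zip y).length) :
    ((x.zip y).map Prod.fst).getD i 0 = x.getD i 0 ∧
    ((x.zip y).map Prod.snd).getD i 0 = y.getD i 0 := by
  induction x generalizing y i with
  | nil => simp at h
  | cons a t ih =>
      cases y with
      | nil => simp at h
      | cons b u =>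
          cases i with
          | zero => simp
          | succ i =>
              simp only [List.zip_cons_cons, List.length_cons, Nat.succ_lt_succ_iff] at h
              simpa using ih u i h

-- 'if cond(p): keep f(p)' as filterMap = filter-then-map
lemma filterMap_ite_some (l : List (Int × Int)) (pred : Int × Int → Prop) [DecidablePred pred]
    (f : Int × Int → Int) :
    l.filterMap (fun p => if pred p then some (f p) else none)
    = (l.filter (fun p => decide (pred p))).map f := by
  induction l with
  | nil => rfl
  | cons q t ih => by_cases hq : pred q <;> simp [hq, ih]

lemma loopA (level : Int) (cs : List (List Int)) (l : List (Int × Int)) :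
    cs.foldl
      (fun (st : (List Int × List Int) × (List Int × List Int)) c =>
        if level < (c.length : Int) then
          let nx := (List.range st.2.1.length).filterMap (fun i =>
            if st.2.1.getD i 0 ∈ c then none else some (st.2.1.getD i 0))
          let ny := (List.range st.2.2.length).filterMap (fun i =>
            if st.2.1.getD i 0 ∈ c then none else some (st.2.2.getD i 0))
          ((nx, ny), (nx, ny))
        else st)
      ((l.map Prod.fst, l.map Prod.snd), (l.map Prod.fst, l.map Prod.snd))
    = (let L := l.filter (fun p => decide (∀ c ∈ cs, level < (c.length : Int) → p.1 ∉ c));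
       ((L.map Prod.fst, L.map Prod.snd), (L.map Prod.fst, L.map Prod.snd))) := by
  induction cs generalizing l with
  | nil => simp
  | cons c cs ih =>
      simp only [List.foldl_cons]
      by_cases hc : level < (c.length : Int)
      · rw [if_pos hc]
        have hx : (List.range (l.map Prod.fst).length).filterMap (fun i =>
              if (l.map Prod.fst).getD i 0 ∈ c then none else some ((l.map Prod.fst).getD i 0))
            = (l.filter (fun p => decide (p.1 ∉ c))).map Prod.fst := by
          rw [List.length_map,
            range_filterMap_pair l (fun a _ => if a ∈ c then none else some a)]
          have := filterMap_ite_some l (fun p => p.1 ∉ c) Prod.fst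
          simpa using this
        have hy : (List.range (l.map Prod.snd).length).filterMap (fun i =>
              if (l.map Prod.fst).getD i 0 ∈ c then none else some ((l.map Prod.snd).getD i 0))
            = (l.filter (fun p => decide (p.1 ∉ c))).map Prod.snd := by
          rw [List.length_map,
            range_filterMap_pair l (fun a b => if a ∈ c then none else some b)]
          have := filterMap_ite_some l (fun p => p.1 ∉ c) Prod.snd
          simpa using this
        simp only [hx, hy]
        rw [ih (l.filter (fun p => decide (p.1 ∉ c)))]
        simp only [List.filter_filter]
        have hfun : (fun (p : Int × Int) =>
              (decide (∀ c' ∈ cs, level < (c'.length : Int) → p.1 ∉ c') && decide (p.1 ∉ c)))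
            = fun (p : Int × Int) =>
              decide (∀ c' ∈ c :: cs, level < (c'.length : Int) → p.1 ∉ c') := by
          funext p
          rw [Bool.eq_iff_iff]
          simp only [Bool.and_eq_true, decide_eq_true_eq, List.forall_mem_cons]
          tauto
        simp only [hfun]
      · rw [if_neg hc, ih l]
        have hfun : (fun (p : Int × Int) =>
              decide (∀ c' ∈ cs, level < (c'.length : Int) → p.1 ∉ c'))
            = fun (p : Int × Int) =>
              decide (∀ c' ∈ c :: cs, level < (c'.length : Int) → p.1 ∉ c') := by
          funext p
          rw [Bool.eq_iff_iff]
          simp only [decide_eq_true_eq, List.forall_mem_cons]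
          tauto
        simp only [hfun]

-- Source B's filtering loop is a parallel filter of the pairs
lemma loopB (bad : List Int) (l : List (Int × Int)) (ax ay : List Int) :
    l.foldl
      (fun (acc : List Int × List Int) p =>
        if p.1 ∈ bad then acc else (acc.1 ++ [p.1], acc.2 ++ [p.2]))
      (ax, ay)
    = (ax ++ (l.filter (fun p => decide (p.1 ∉ bad))).map Prod.fst,
       ay ++ (l.filter (fun p => decide (p.1 ∉ bad))).map Prod.snd) := by
  induction l generalizing ax ay with
  | nil => simp
  | cons q t ih => by_cases hq : q.1 ∈ bad <;> simp [hq, ih]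

-- membership in Source B's bad set
lemma mem_bad (l : List (Int × Int)) (cond : Int × Int → Prop) [DecidablePred cond] (v : Int) :
    (v ∈ l.foldl
        (fun s p => if cond p then PySem.Set.add s p.1 else s)
        PySem.Set.empty)
    ↔ ∃ p ∈ l, cond p ∧ p.1 = v := by
  rw [PySem.List.foldl_ite_eq_foldl_filter]
  rw [PySem.Set.mem_foldl_add (f := Prod.fst)]
  simp only [PySem.Set.empty, List.not_mem_nil, false_or, List.mem_filter,
    decide_eq_true_eq]
  constructor
  · rintro ⟨p, ⟨hp, hc⟩, hv⟩; exact ⟨p, hp, hc, hv.symm⟩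
  · rintro ⟨p, hp, hc, hv⟩; exact ⟨p, ⟨hp, hc⟩, hv.symm⟩

-- A's cluster j, over the paired list
lemma cluster_eq (x y : List Int) (h : x.length ≤ y.length) (j : Nat) :
    (List.range x.length).filterMap (fun i =>
        if y.getD i 0 = (j : Int) then some (x.getD i 0) else none)
    = ((x.zip y).filter (fun p => decide (p.2 = (j : Int)))).map Prod.fst := by
  have hl : x.length = (x.zip y).length := by rw [List.length_zip]; omega
  calc (List.range x.length).filterMap (fun i =>
          if y.getD i 0 = (j : Int) then some (x.getD i 0) else none)
      = (List.range (x.zip y).length).filterMap (fun i =>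
          if ((x.zip y).map Prod.snd).getD i 0 = (j : Int)
          then some (((x.zip y).map Prod.fst).getD i 0) else none) := by
        rw [← hl]
        apply List.filterMap_congr
        intro i hi
        have hi' : i < (x.zip y).length := by rw [← hl]; exact List.mem_range.mp hi
        rw [(getD_zip x y i hi').1, (getD_zip x y i hi').2]
    _ = (x.zip y).filterMap (fun p => if p.2 = (j : Int) then some p.1 else none) :=
        range_filterMap_pair (x.zip y) (fun a b => if b = (j : Int) then some a else none)
    _ = ((x.zip y).filter (fun p => decide (p.2 = (j : Int)))).map Prod.fst :=
        filterMap_ite_some (x.zip y) (fun p => p.2 = (j : Int)) Prod.fst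

lemma length_cluster (l : List (Int × Int)) (j : Int) :
    ((l.filter (fun p => decide (p.2 = j))).map Prod.fst).length
    = (l.map Prod.snd).count j := by
  rw [List.length_map, ← List.countP_eq_length_filter]
  calc (l.countP (fun p => decide (p.2 = j)))
      = l.countP ((fun b => b == j) ∘ Prod.snd) := by
        apply List.countP_congr; intro p _; simp
    _ = (l.map Prod.snd).countP (fun b => b == j) := List.countP_map.symm
    _ = (l.map Prod.snd).count j := by rw [List.count_eq_countP]

-- Source B's counts dict holds the cluster sizes of the paired positions
lemma counts_getD (x y : List Int) (ℓ : Int) :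
    ((x.zip y).foldl (fun d p => d.insert p.2 (d.getD p.2 0 + 1)) PySem.Dict.empty).getD ℓ 0
    = (((x.zip y).map Prod.snd).count ℓ : Int) := by
  have hm := List.foldl_map (f := Prod.snd)
    (g := fun (d : PySem.Dict Int Int) lab => d.insert lab (d.getD lab 0 + 1))
    (l := x.zip y) (init := PySem.Dict.empty)
  rw [← hm, PySem.Dict.getD_foldl_insert_add_one]
  simp

theorem remove_front_spec : Claim_unchanged_remove_front := by
  intro x y level _ hpre hnd
  obtain ⟨hle, htrig⟩ := hpre
  unfold remove_front remove_front_alt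
  simp only
  -- rewrite Source B's counts into paired-label counts everywhere
  rw [show (fun (s : PySem.Set Int) (p : Int × Int) =>
        if level <
            ((x.zip y).foldl (fun d q => d.insert q.2 (d.getD q.2 0 + 1)) PySem.Dict.empty).getD p.2 0
        then PySem.Set.add s p.1 else s)
      = (fun (s : PySem.Set Int) (p : Int × Int) =>
        if level < (((x.zip y).map Prod.snd).count p.2 : Int)
        then PySem.Set.add s p.1 else s) from by
        funext s p; rw [counts_getD x y p.2]]
  -- outside D_, Source B's condition coincides pointwise with the range-guarded one
  have hguard : (x.zip y).foldl
      (fun s p => if level < (((x.zip y).map Prod.snd).count p.2 : Int)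
        then PySem.Set.add s p.1 else s) PySem.Set.empty
      = (x.zip y).foldl
      (fun s p => if 0 ≤ p.2 ∧ p.2 < ((y.length : Int)) ∧
          level < (((x.zip y).map Prod.snd).count p.2 : Int)
        then PySem.Set.add s p.1 else s) PySem.Set.empty := by
    apply PySem.List.foldl_congr_mem
    intro s p hp
    by_cases hc : level < (((x.zip y).map Prod.snd).count p.2 : Int)
    · rw [if_pos hc, if_pos ?_]
      have : ¬ ((p.2 < 0 ∨ (y.length : Int) ≤ p.2) ∧
          level < (((x.zip y).map Prod.snd).count p.2 : Int)) := by
        intro hcon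
        exact hnd ⟨p, hp, hcon.1, hcon.2⟩
      refine ⟨?_, ?_, hc⟩ <;> omega
    · rw [if_neg hc, if_neg (by tauto)]
  rw [hguard]
  by_cases hlt : x.length < y.length
  · -- x strictly shorter: Pre_ says no cluster is oversized, so A leaves (x, y) alone
    have hno := htrig hlt
    have hbad : ((x.zip y).foldl
        (fun s p => if 0 ≤ p.2 ∧ p.2 < ((y.length : Int)) ∧ level < (((x.zip y).map Prod.snd).count p.2 : Int)
          then PySem.Set.add s p.1 else s) PySem.Set.empty) = [] := by
      have hstep : ∀ p ∈ x.zip y, ∀ s : PySem.Set Int,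
          (if 0 ≤ p.2 ∧ p.2 < ((y.length : Int)) ∧
              level < (((x.zip y).map Prod.snd).count p.2 : Int)
            then PySem.Set.add s p.1 else s) = s := by
        intro p hp s
        rw [if_neg]
        rintro ⟨h0, hn, hcv⟩
        have hj : p.2.toNat ∈ List.range y.length := List.mem_range.mpr (by omega)
        have := hno p.2.toNat hj
        rw [show ((p.2.toNat : Nat) : Int) = p.2 from by omega] at this
        omega
      rw [PySem.List.foldl_congr_mem' _ _ _ _ hstep, PySem.List.foldl_ignore]
      rfl
    rw [hbad, if_pos rfl]
    -- A's loop never fires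
    have hstepA : ∀ c ∈ (List.range y.length).map (fun (j : Nat) =>
          (List.range x.length).filterMap (fun i =>
            if y.getD i 0 = (j : Int) then some (x.getD i 0) else none)),
        ∀ st : (List Int × List Int) × (List Int × List Int),
        (if level < (c.length : Int) then
            ((((List.range st.2.1.length).filterMap (fun i =>
                if st.2.1.getD i 0 ∈ c then none else some (st.2.1.getD i 0))),
              ((List.range st.2.2.length).filterMap (fun i =>
                if st.2.1.getD i 0 ∈ c then none else some (st.2.2.getD i 0)))),
             (((List.range st.2.1.length).filterMap (fun i =>
                if st.2.1.getD i 0 ∈ c then none else some (st.2.1.getD i 0))),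
              ((List.range st.2.2.length).filterMap (fun i =>
                if st.2.1.getD i 0 ∈ c then none else some (st.2.2.getD i 0)))))
          else st) = st := by
      intro c hc st
      rw [if_neg]
      rcases List.mem_map.mp hc with ⟨j, hj, rfl⟩
      rw [cluster_eq x y (le_of_lt hlt) j, length_cluster]
      have := hno j hj
      omega
    rw [PySem.List.foldl_congr_mem' _ _ _ _ hstepA, PySem.List.foldl_ignore]
  · rcases hle with hy0 | hle'
    · -- y = []: no clusters, nothing paired; both return (x, y)
      have : y = [] := List.length_eq_zero_iff.mp hy0
      subst this
      simp
    · have heq : x.length = y.length := by omega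
      have hx : (x.zip y).map Prod.fst = x := List.map_fst_zip (le_of_eq heq)
      have hy : (x.zip y).map Prod.snd = y := List.map_snd_zip (ge_of_eq heq)
      conv_lhs =>
        rw [show ((x, y), (x, y)) = ((((x.zip y).map Prod.fst), ((x.zip y).map Prod.snd)),
              (((x.zip y).map Prod.fst), ((x.zip y).map Prod.snd))) from by rw [hx, hy]]
      rw [loopA]
      simp only
      -- the A-side keep predicate is exactly "not in Source B's bad set", pointwise on the zip
      have hiff : ∀ p ∈ x.zip y,
          ((∀ c ∈ (List.range y.length).map (fun (j : Nat) =>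
              (List.range x.length).filterMap (fun i =>
                if y.getD i 0 = (j : Int) then some (x.getD i 0) else none)),
            level < (c.length : Int) → p.1 ∉ c)
          ↔ ¬ p.1 ∈ ((x.zip y).foldl
              (fun s q => if 0 ≤ q.2 ∧ q.2 < ((y.length : Int)) ∧
                  level < (((x.zip y).map Prod.snd).count q.2 : Int)
                then PySem.Set.add s q.1 else s) PySem.Set.empty)) := by
        intro p hp
        rw [mem_bad (x.zip y)
          (fun q => 0 ≤ q.2 ∧ q.2 < ((y.length : Int)) ∧
            level < (((x.zip y).map Prod.snd).count q.2 : Int)) p.1]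
        have hmemcl : (List.range y.length).map (fun (j : Nat) =>
              (List.range x.length).filterMap (fun i =>
                if y.getD i 0 = (j : Int) then some (x.getD i 0) else none)) =
            (List.range y.length).map (fun (j : Nat) =>
              ((x.zip y).filter (fun r => decide (r.2 = (j : Int)))).map Prod.fst) := by
          apply List.map_congr_left
          intro j _
          exact cluster_eq x y (le_of_eq heq) j
        rw [hmemcl]
        constructor
        · intro hall hex
          rcases hex with ⟨q, hq, ⟨h0, hn, hcv⟩, hqv⟩
          have hjlt : q.2.toNat < y.length := by omega
          have hcval : ((q.2.toNat : Nat) : Int) = q.2 := by omega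
          have hc := hall (((x.zip y).filter (fun r => decide (r.2 = (q.2.toNat : Int)))).map Prod.fst)
            (List.mem_map_of_mem (List.mem_range.mpr hjlt))
          rw [length_cluster, hcval] at hc
          have : p.1 ∈ ((x.zip y).filter (fun r => decide (r.2 = q.2))).map Prod.fst := by
            refine List.mem_map.mpr ⟨q, ?_, hqv⟩
            refine List.mem_filter.mpr ⟨hq, by simp⟩
          exact absurd this (hc hcv)
        · intro hne c hcmem hclen
          rcases List.mem_map.mp hcmem with ⟨j, hj, rfl⟩
          rw [length_cluster] at hclen
          intro hpm
          rcases List.mem_map.mp hpm with ⟨q, hqf, hqv⟩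
          rcases List.mem_filter.mp hqf with ⟨hqz, hq2⟩
          have hq2' : q.2 = (j : Int) := by simpa using hq2
          refine hne ⟨q, hqz, ⟨?_, ?_, ?_⟩, hqv⟩
          · rw [hq2']; exact Int.natCast_nonneg j
          · rw [hq2']; exact_mod_cast List.mem_range.mp hj
          · rw [hq2']; exact hclen
      have hfeq : (x.zip y).filter (fun p => decide (∀ c ∈ (List.range y.length).map (fun (j : Nat) =>
              (List.range x.length).filterMap (fun i =>
                if y.getD i 0 = (j : Int) then some (x.getD i 0) else none)),
            level < (c.length : Int) → p.1 ∉ c))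
          = (x.zip y).filter (fun p => decide (p.1 ∉ ((x.zip y).foldl
              (fun s q => if 0 ≤ q.2 ∧ q.2 < ((y.length : Int)) ∧
                  level < (((x.zip y).map Prod.snd).count q.2 : Int)
                then PySem.Set.add s q.1 else s) PySem.Set.empty))) := by
        apply List.filter_congr
        intro p hp
        rw [decide_eq_decide]
        exact hiff p hp
      rw [hfeq]
      by_cases hbad : ((x.zip y).foldl
          (fun s q => if 0 ≤ q.2 ∧ q.2 < ((y.length : Int)) ∧
              level < (((x.zip y).map Prod.snd).count q.2 : Int)
            then PySem.Set.add s q.1 else s) PySem.Set.empty) = []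
      · rw [if_pos hbad, hbad]
        simp [hx, hy]
      · rw [if_neg hbad, loopB]
        simp

theorem remove_front_changed : Claim_changed_remove_front := by
  unfold Claim_changed_remove_front; decide
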